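-- pv_equiv track=rewrite | github.com/MoebiusSt/chatterbox-pipeline | src/preprocessor/language_tag_processor.py | reconstruct_with_punctuation
-- ===== SOURCE A (Python) =====
-- from typing import List, Dict, NamedTuple, Optional, Any
--
-- def reconstruct_with_punctuation(tokens: List[Dict[str, str]], english_words: List[str]) -> str:
--     """
--     Reconstruct text using original punctuation and spacing with transformed words.
--
--     Args:
--         tokens: Original tokens with punctuation
--         english_words: Transformed English words
--
--     Returns:
--         Reconstructed text
--     """
--     result = []
--     word_index = 0
--
--     for token in tokens:
--         if token['type'] == 'word':
--             # Replace word with English transformation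
--             if word_index < len(english_words):
--                 result.append(english_words[word_index])
--                 word_index += 1
--             else:
--                 result.append(token['text'])  # Fallback
--         else:
--             # Keep punctuation and spacing as-is
--             result.append(token['text'])
--
--     return ''.join(result)
-- ===== SOURCE B (Python) =====
-- def reconstruct_with_punctuation(tokens, english_words):
--     word_positions = [i for i, t in enumerate(tokens) if t['type'] == 'word']
--     replacement = dict(zip(word_positions, english_words))
--     return ''.join(replacement[i] if i in replacement else t['text']
--                    for i, t in enumerate(tokens))
-- ===== Notes on version B (the rewrite author's own statement) =====
-- stated objective: alternative
-- what changed: Replaces the running word-index counter inside the single loop by a two-pass scheme: first collect the indices of word tokens and build a dict mapping those indices to english_words (zip truncates), then map over enumerate(tokens) looking each index up in the dict.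
import Mathlib
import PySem

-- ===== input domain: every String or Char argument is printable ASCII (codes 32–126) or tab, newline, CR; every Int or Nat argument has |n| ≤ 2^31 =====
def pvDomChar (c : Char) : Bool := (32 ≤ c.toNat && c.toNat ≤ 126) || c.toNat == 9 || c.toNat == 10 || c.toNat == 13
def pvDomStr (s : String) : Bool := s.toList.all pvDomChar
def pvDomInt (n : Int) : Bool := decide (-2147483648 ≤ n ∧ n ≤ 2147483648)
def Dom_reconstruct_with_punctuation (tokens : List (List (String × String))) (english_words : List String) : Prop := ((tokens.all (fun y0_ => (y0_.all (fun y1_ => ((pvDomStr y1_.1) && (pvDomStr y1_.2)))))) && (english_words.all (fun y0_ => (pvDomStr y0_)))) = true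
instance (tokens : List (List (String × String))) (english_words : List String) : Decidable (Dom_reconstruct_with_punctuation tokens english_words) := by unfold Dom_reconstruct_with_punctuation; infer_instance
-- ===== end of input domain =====

-- B rebuilds the text via an index→replacement dict (zip of word positions with english_words) and a
-- second enumerate pass, instead of A's running word-index counter inside one loop; same cost.

-- ===== PORT A =====
-- single pass, state = (result list, word_index); english_words[word_index] is guarded by
-- word_index < len, so getD is exact there
def reconstruct_with_punctuation (tokens : List (List (String × String))) (english_words : List String) : String :=
  let st := tokens.foldl (fun (st : List String × Nat) token =>
      if PySem.Dict.getD (PySem.Dict.mk token) "type" "" == "word" then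
        if st.2 < english_words.length then
          (st.1 ++ [english_words.getD st.2 ""], st.2 + 1)
        else
          (st.1 ++ [PySem.Dict.getD (PySem.Dict.mk token) "text" ""], st.2)
      else
        (st.1 ++ [PySem.Dict.getD (PySem.Dict.mk token) "text" ""], st.2))
    ([], 0)
  PySem.Str.join "" st.1

-- ===== PORT B =====
-- pass 1: positions of word tokens; dict(zip(word_positions, english_words)); pass 2: lookup per index
def reconstruct_with_punctuation_alt (tokens : List (List (String × String))) (english_words : List String) : String :=
  let word_positions := (PySem.List.enumerate tokens).filterMap
      (fun p => if PySem.Dict.getD (PySem.Dict.mk p.2) "type" "" == "word" then some p.1 else none)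
  let replacement : PySem.Dict Int String := PySem.Dict.ofList (word_positions.zip english_words)
  PySem.Str.join "" ((PySem.List.enumerate tokens).map
      (fun p => match replacement.get? p.1 with
        | some w => w
        | none => PySem.Dict.getD (PySem.Dict.mk p.2) "text" ""))

-- ===== PRECONDITION & SPEC =====
-- Pre_ is exactly where Python returns: every token has the key "type", and a token whose "text" the
-- run reads — every non-word token, and any word token past the supply of english_words (fewer word
-- tokens strictly before it than len(english_words) fails) — also has the key "text"; a missing read
-- key is a KeyError in both A and B.
def Pre_reconstruct_with_punctuation (tokens : List (List (String × String))) (english_words : List String) : Prop :=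
  ∀ i, (h : i < tokens.length) →
    (PySem.Dict.mk tokens[i]).contains "type" = true ∧
    (¬((PySem.Dict.getD (PySem.Dict.mk tokens[i]) "type" "" == "word") = true ∧
        ((tokens.take i).filter
          (fun t => PySem.Dict.getD (PySem.Dict.mk t) "type" "" == "word")).length
          < english_words.length) →
      (PySem.Dict.mk tokens[i]).contains "text" = true)
instance (tokens : List (List (String × String))) (english_words : List String) : Decidable (Pre_reconstruct_with_punctuation tokens english_words) := by unfold Pre_reconstruct_with_punctuation; infer_instance
def pvWitness_reconstruct_with_punctuation : (List (List (String × String))) × List String :=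
  ([[("type", "word"), ("text", "hi")], [("type", "punct"), ("text", ", ")], [("type", "word"), ("text", "zz")]], ["hello"])
def Spec_reconstruct_with_punctuation (tokens : List (List (String × String))) (english_words : List String) (out : String) : Prop := out = reconstruct_with_punctuation_alt tokens english_words
instance (tokens : List (List (String × String))) (english_words : List String) (out : String) : Decidable (Spec_reconstruct_with_punctuation tokens english_words out) := by unfold Spec_reconstruct_with_punctuation; infer_instance

-- ===== CLAIM (what is proved, stated in full; the proofs are below) =====
def Claim_equal_reconstruct_with_punctuation : Prop := ∀ (tokens : List (List (String × String))) (english_words : List String), Dom_reconstruct_with_punctuation tokens english_words → Pre_reconstruct_with_punctuation tokens english_words → Spec_reconstruct_with_punctuation tokens english_words (reconstruct_with_punctuation tokens english_words)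

-- ===== LEMMAS AND PROOFS =====

-- token accessors (proof-side shorthands)
def pvIsWord (t : List (String × String)) : Bool := PySem.Dict.getD (PySem.Dict.mk t) "type" "" == "word"
def pvText (t : List (String × String)) : String := PySem.Dict.getD (PySem.Dict.mk t) "text" ""

-- common specification: the list of output pieces
def pvSpecList : List (List (String × String)) → List String → List String
  | [], _ => []
  | t :: ts, ws =>
    if pvIsWord t then
      match ws with
      | w :: ws' => w :: pvSpecList ts ws'
      | [] => pvText t :: pvSpecList ts []
    else pvText t :: pvSpecList ts ws

-- ---- A side ----
theorem pvA_fold (english_words : List String) :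
    -- A's fold, from any accumulator and counter, appends pvSpecList of the remaining words
    ∀ (ts : List (List (String × String))) (acc : List String) (wi : Nat),
    (ts.foldl (fun (st : List String × Nat) token =>
      if PySem.Dict.getD (PySem.Dict.mk token) "type" "" == "word" then
        if st.2 < english_words.length then
          (st.1 ++ [english_words.getD st.2 ""], st.2 + 1)
        else
          (st.1 ++ [PySem.Dict.getD (PySem.Dict.mk token) "text" ""], st.2)
      else
        (st.1 ++ [PySem.Dict.getD (PySem.Dict.mk token) "text" ""], st.2))
      (acc, wi)).1 = acc ++ pvSpecList ts (english_words.drop wi) := by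
  intro ts
  induction ts with
  | nil => intro acc wi; simp [pvSpecList]
  | cons t ts ih =>
    intro acc wi
    by_cases hw : pvIsWord t
    · by_cases hlt : wi < english_words.length
      · have hdrop : english_words.drop wi = english_words[wi] :: english_words.drop (wi + 1) :=
          List.drop_eq_getElem_cons hlt
        simp only [List.foldl_cons, pvIsWord] at *
        rw [if_pos hw, if_pos hlt, ih, hdrop]
        simp [pvSpecList, pvIsWord, hw, List.getElem?_eq_getElem hlt]
      · have hdrop : english_words.drop wi = [] := List.drop_eq_nil_of_le (by omega)
        simp only [List.foldl_cons, pvIsWord] at *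
        rw [if_pos hw, if_neg hlt, ih, hdrop]
        simp [pvSpecList, pvIsWord, pvText, hw]
    · simp only [List.foldl_cons, pvIsWord] at *
      rw [if_neg hw, ih]
      simp [pvSpecList, pvIsWord, pvText, hw]

-- ---- B side ----
def pvWP (ts : List (List (String × String))) (s : Int) : List Int :=
  (PySem.List.enumerate ts s).filterMap (fun p => if pvIsWord p.2 then some p.1 else none)

theorem pvWP_cons (t : List (String × String)) (ts : List (List (String × String))) (s : Int) :
    pvWP (t :: ts) s = if pvIsWord t then s :: pvWP ts (s + 1) else pvWP ts (s + 1) := by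
  simp only [pvWP, PySem.List.enumerate_cons, List.filterMap_cons]
  by_cases h : pvIsWord t <;> simp [h]

theorem pvWP_ge (ts : List (List (String × String))) (s : Int) :
    ∀ q ∈ pvWP ts s, s ≤ q := by
  intro q hq
  simp only [pvWP, List.mem_filterMap] at hq
  obtain ⟨p, hp, hif⟩ := hq
  by_cases h : pvIsWord p.2 = true
  · rw [if_pos h] at hif
    injection hif with hif
    subst hif
    rw [PySem.List.mem_enumerate_iff] at hp
    obtain ⟨k, hk, rfl⟩ := hp
    simp
  · simp [h] at hif

theorem pv_get?_none {pairs : List (Int × String)} {x : Int}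
    (h : ∀ p ∈ pairs, p.1 ≠ x) : (PySem.Dict.mk pairs).get? x = none := by
  simp only [PySem.Dict.get?, Option.map_eq_none_iff]
  rw [List.find?_eq_none]
  intro p hp
  simpa using h p hp

theorem pvB_main :
    ∀ (ts : List (List (String × String))) (s : Int) (ws : List String),
    ((PySem.List.enumerate ts s).map
      (fun p => match (PySem.Dict.mk ((pvWP ts s).zip ws)).get? p.1 with
        | some w => w
        | none => pvText p.2)) = pvSpecList ts ws := by
  intro ts
  induction ts with
  | nil => intro s ws; simp [pvSpecList, pvWP, PySem.List.enumerate_nil]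
  | cons t ts ih =>
    intro s ws
    rw [PySem.List.enumerate_cons, pvWP_cons]
    by_cases hw : pvIsWord t
    · rw [if_pos hw]
      cases ws with
      | nil =>
        simp only [List.zip_nil_right]
        have hhead : (PySem.Dict.mk ([] : List (Int × String))).get? s = none := by
          simp [PySem.Dict.get?]
        have := ih (s + 1) []
        simp only [List.zip_nil_right] at this ⊢
        simp only [List.map_cons, hhead]
        rw [this]
        simp [pvSpecList, hw]
      | cons w ws' =>
        simp only [List.zip_cons_cons, List.map_cons]
        have hhead : (PySem.Dict.mk ((s, w) :: (pvWP ts (s+1)).zip ws')).get? s = some w := by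
          rw [PySem.Dict.get?_mk_cons]; simp
        rw [hhead]
        have htl : ((PySem.List.enumerate ts (s+1)).map
            (fun p => match (PySem.Dict.mk ((s, w) :: (pvWP ts (s+1)).zip ws')).get? p.1 with
              | some w => w
              | none => pvText p.2)) = pvSpecList ts ws' := by
          rw [← ih (s + 1) ws']
          apply List.map_congr_left
          intro p hp
          rw [PySem.List.mem_enumerate_iff] at hp
          obtain ⟨k, hk, rfl⟩ := hp
          rw [PySem.Dict.get?_mk_cons]
          have : ¬ (s == s + 1 + (k : Int)) = true := by simp; omega
          rw [if_neg this]
        rw [htl]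
        simp [pvSpecList, hw]
    · rw [if_neg hw]
      simp only [List.map_cons]
      have hhead : (PySem.Dict.mk ((pvWP ts (s+1)).zip ws)).get? s = none := by
        apply pv_get?_none
        intro p hp
        have h1 : p.1 ∈ pvWP ts (s + 1) := (List.of_mem_zip hp).1
        have := pvWP_ge ts (s + 1) p.1 h1
        omega
      rw [hhead]
      rw [ih (s + 1) ws]
      simp [pvSpecList, hw]

-- dict(zip) has distinct keys here, so ofList's items are the zip itself
theorem pvWP_nodup (ts : List (List (String × String))) (s : Int) : (pvWP ts s).Nodup := by
  induction ts generalizing s with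
  | nil => simp [pvWP, PySem.List.enumerate_nil]
  | cons t ts ih =>
    rw [pvWP_cons]
    by_cases hw : pvIsWord t
    · rw [if_pos hw]
      refine List.nodup_cons.2 ⟨?_, ih (s + 1)⟩
      intro hmem
      have := pvWP_ge ts (s + 1) s hmem
      omega
    · rw [if_neg hw]; exact ih (s + 1)

theorem pv_ofList_mk {pairs : List (Int × String)} (h : (pairs.map Prod.fst).Nodup) :
    PySem.Dict.ofList pairs = PySem.Dict.mk pairs := by
  apply PySem.Dict.ext
  have := PySem.Dict.items_foldl_insert_fresh (l := pairs) (k := Prod.fst) (v := Prod.snd)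
    (d := PySem.Dict.empty) (by intro a _; simp [PySem.Dict.contains_empty]) h
  simp only [PySem.Dict.ofList, PySem.Dict.update]
  simp only at this ⊢
  rw [this]
  simp [PySem.Dict.empty]

theorem pv_zip_fst_sublist (as : List Int) (bs : List String) :
    List.Sublist ((as.zip bs).map Prod.fst) as := by
  induction as generalizing bs with
  | nil => simp
  | cons a as ih =>
    cases bs with
    | nil => simp
    | cons b bs => simpa using List.Sublist.cons₂ a (ih bs)

-- ===== VERDICT (by name: the statement is the Claim_ definition above) =====
theorem reconstruct_with_punctuation_spec : Claim_equal_reconstruct_with_punctuation := by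
  intro tokens english_words _hDom _hPre
  show reconstruct_with_punctuation tokens english_words = reconstruct_with_punctuation_alt tokens english_words
  simp only [reconstruct_with_punctuation, reconstruct_with_punctuation_alt]
  have hA := pvA_fold english_words tokens [] 0
  simp only [List.drop_zero, List.nil_append] at hA
  rw [hA]
  have hnd : (((pvWP tokens 0).zip english_words).map Prod.fst).Nodup :=
    (pvWP_nodup tokens 0).sublist (pv_zip_fst_sublist _ _)
  have hB := pvB_main tokens 0 english_words
  have hwp : (PySem.List.enumerate tokens).filterMap
      (fun p => if PySem.Dict.getD (PySem.Dict.mk p.2) "type" "" == "word" then some p.1 else none)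
      = pvWP tokens 0 := rfl
  rw [hwp, pv_ofList_mk hnd]
  congr 1
  exact hB.symm
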